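-- pv_equiv track=rewrite | github.com/vEnhance/blog.evanchen.cc | scripts/manage_tags.py | _set_tags
-- ===== SOURCE A (Python) =====
-- def _set_tags(text: str, tags: list[str]) -> str:
--     """Replace the tags: line inside the front matter."""
--     if not text.startswith("---\n"):
--         return text
--     lines = text.split("\n")
--     in_fm = True  # we already know line 0 is ---
--     for i, line in enumerate(lines[1:], start=1):
--         if line == "---":
--             break
--         if in_fm and line.startswith("tags:"):
--             new_val = ", ".join(tags)
--             lines[i] = f"tags: {new_val}".rstrip()
--             break
--     return "\n".join(lines)
-- ===== SOURCE B (Python) =====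
-- def _set_tags(text: str, tags: list[str]) -> str:
--     """Replace the tags: line inside the front matter."""
--     if not text.startswith("---\n"):
--         return text
--     # cut the text at the first line that starts with 'tags:'
--     pre, sep, post = text.partition("\ntags:")
--     if not sep:
--         return text
--     # no closing '---' line may come before that cut
--     if "\n---\n" in pre + "\n":
--         return text
--     # drop the rest of the old tags line, keep everything after it
--     _, nl, rest = post.partition("\n")
--     return pre + "\n" + ("tags: " + ", ".join(tags)).rstrip() + nl + rest
-- ===== Notes on version B (the rewrite author's own statement) =====
-- stated objective: alternative
-- what changed: B never splits the text into a line list or loops over lines: it cuts the raw string once at the first '\ntags:' occurrence with str.partition, rejects the cut if a closing '\n---\n' line occurs in the prefix, and splices the new tags line in with one more partition, whereas A builds lines = text.split('\n'), iterates with enumerate, mutates lines[i] and rejoins.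
import Mathlib
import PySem

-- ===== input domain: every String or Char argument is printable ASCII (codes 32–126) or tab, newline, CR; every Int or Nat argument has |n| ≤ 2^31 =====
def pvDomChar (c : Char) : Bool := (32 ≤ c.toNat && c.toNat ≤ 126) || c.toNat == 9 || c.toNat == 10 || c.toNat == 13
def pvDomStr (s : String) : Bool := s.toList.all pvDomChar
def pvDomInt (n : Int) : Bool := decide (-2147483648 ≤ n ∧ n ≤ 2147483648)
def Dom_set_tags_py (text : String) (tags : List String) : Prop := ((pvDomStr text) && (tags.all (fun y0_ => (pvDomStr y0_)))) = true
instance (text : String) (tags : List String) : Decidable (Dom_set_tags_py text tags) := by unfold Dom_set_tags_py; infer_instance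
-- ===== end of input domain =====

-- B rebuilds the text by cutting the raw string at the first "\ntags:" occurrence (no line list, no
-- loop over lines) instead of A's split-into-lines / mutate / rejoin; return value only, same cost.

-- ===== PORT A =====
-- the for-loop over lines[1:] with its two breaks and the in-place assignment lines[i] = …
def setTagsLoopA (nl : List Char) : List (List Char) → List (List Char)
  | [] => []
  | l :: rest =>
    if l = ['-', '-', '-'] then l :: rest
    else if PySem.Chars.startswith l ['t', 'a', 'g', 's', ':'] then nl :: rest
    else l :: setTagsLoopA nl rest

def set_tags_py (text : String) (tags : List String) : String :=
  if !(PySem.Str.startswith text "---\n") then text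
  else
    let lines := PySem.Chars.splitOn text.toList ['\n']
    let nl := PySem.Chars.rstrip (('t' :: 'a' :: 'g' :: 's' :: ':' :: ' ' :: []) ++
        PySem.Chars.join [',', ' '] (tags.map String.toList))
    String.ofList (PySem.Chars.join ['\n']
      (match lines with
       | [] => []
       | h :: t => h :: setTagsLoopA nl t))

-- ===== PORT B =====
-- text.partition("\ntags:") / post.partition("\n") are ported through Chars.find (first occurrence);
-- the '"\n---\n" in pre + "\n"' test is Chars.isIn.
def set_tags_py_alt (text : String) (tags : List String) : String :=
  if !(PySem.Str.startswith text "---\n") then text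
  else
    let cs := text.toList
    let p := PySem.Chars.find cs ('\n' :: 't' :: 'a' :: 'g' :: 's' :: ':' :: [])
    if p = -1 then text
    else
      let pre := cs.take p.toNat
      let post := cs.drop (p.toNat + 6)
      if PySem.Chars.isIn ['\n', '-', '-', '-', '\n'] (pre ++ ['\n']) then text
      else
        let nl := PySem.Chars.rstrip (('t' :: 'a' :: 'g' :: 's' :: ':' :: ' ' :: []) ++
            PySem.Chars.join [',', ' '] (tags.map String.toList))
        let e := PySem.Chars.find post ['\n']
        let tail := if e = -1 then ([] : List Char) else '\n' :: post.drop (e.toNat + 1)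
        String.ofList (pre ++ '\n' :: (nl ++ tail))

-- ===== PRECONDITION & SPEC =====
def Spec_set_tags_py (text : String) (tags : List String) (out : String) : Prop := out = set_tags_py_alt text tags
instance (text : String) (tags : List String) (out : String) : Decidable (Spec_set_tags_py text tags out) := by unfold Spec_set_tags_py; infer_instance

-- ===== CLAIM (what is proved, stated in full; the proofs are below) =====
def Claim_equal_set_tags_py : Prop := ∀ (text : String) (tags : List String), Dom_set_tags_py text tags → Spec_set_tags_py text tags (set_tags_py text tags)

-- ===== LEMMAS AND PROOFS =====

def nlJ (t : List (List Char)) : List Char := PySem.Chars.join ['\n'] t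

def mySplit : List Char → List (List Char)
  | [] => [[]]
  | c :: r =>
    if c = '\n' then [] :: mySplit r
    else match mySplit r with
      | [] => [[c]]
      | h :: t2 => (c :: h) :: t2

theorem mySplit_ne_nil (s : List Char) : mySplit s ≠ [] := by
  induction s with
  | nil => simp [mySplit]
  | cons c r ih =>
    simp only [mySplit]
    split
    · simp
    · split
      · simp
      · simp

theorem mySplit_single (a : List Char) (ha : '\n' ∉ a) : mySplit a = [a] := by
  induction a with
  | nil => rfl
  | cons c r ih =>
    simp only [List.mem_cons, not_or] at ha
    have hc : ¬ c = '\n' := fun h => ha.1 (Eq.symm h)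
    simp only [mySplit, if_neg hc, ih ha.2]

theorem mySplit_append_nl (a b : List Char) (ha : '\n' ∉ a) :
    mySplit (a ++ '\n' :: b) = a :: mySplit b := by
  induction a with
  | nil => simp [mySplit]
  | cons c r ih =>
    simp only [List.mem_cons, not_or] at ha
    have hc : ¬ c = '\n' := fun h => ha.1 (Eq.symm h)
    simp only [List.cons_append, mySplit, if_neg hc, ih ha.2]

theorem join_mySplit (s : List Char) : nlJ (mySplit s) = s := by
  induction s with
  | nil => simp [mySplit, nlJ, PySem.Chars.join_singleton]
  | cons c r ih =>
    simp only [mySplit]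
    split
    · rename_i h
      subst h
      cases hr : mySplit r with
      | nil => exact absurd hr (mySplit_ne_nil r)
      | cons h2 t2 =>
        rw [← hr]
        unfold nlJ at *
        rw [hr, PySem.Chars.join_cons_cons, ← hr, ih]
        simp
    · cases hr : mySplit r with
      | nil => exact absurd hr (mySplit_ne_nil r)
      | cons h2 t2 =>
        unfold nlJ at *
        rw [hr] at ih
        cases t2 with
        | nil =>
          rw [PySem.Chars.join_singleton] at ih ⊢
          simp [ih]
        | cons h3 t3 =>
          rw [PySem.Chars.join_cons_cons] at ih ⊢
          simp [ih]

theorem nlfree_mySplit (s : List Char) : ∀ l ∈ mySplit s, '\n' ∉ l := by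
  induction s with
  | nil => simp [mySplit]
  | cons c r ih =>
    simp only [mySplit]
    split
    · intro l hl
      rcases List.mem_cons.1 hl with h | h
      · simp [h]
      · exact ih l h
    · rename_i hc
      cases hr : mySplit r with
      | nil => exact absurd hr (mySplit_ne_nil r)
      | cons h2 t2 =>
        intro l hl
        rcases List.mem_cons.1 hl with h | h
        · subst h
          intro hmem
          rcases List.mem_cons.1 hmem with h | h
          · exact hc (Eq.symm h)
          · exact ih h2 (by rw [hr]; exact List.mem_cons_self) h
        · exact ih l (by rw [hr]; exact List.mem_cons_of_mem _ h) 

theorem splitOn_go_eq (fuel : Nat) (l cur : List Char) (acc : List (List Char))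
    (hf : l.length < fuel) (hc : '\n' ∉ cur) :
    PySem.Chars.splitOn.go ['\n'] fuel l cur acc = acc.reverse ++ mySplit (cur.reverse ++ l) := by
  induction fuel generalizing l cur acc with
  | zero => omega
  | succ n ih =>
    cases l with
    | nil =>
      have h1 : PySem.Chars.splitOn.go ['\n'] (n+1) [] cur acc = (cur.reverse :: acc).reverse := by
        simp [PySem.Chars.splitOn.go]
      rw [h1]
      simp [mySplit_single cur.reverse (by simpa using hc)]
    | cons c rest =>
      simp only [List.length_cons] at hf
      by_cases hcnl : c = '\n'
      · subst hcnl
        have h1 : PySem.Chars.splitOn.go ['\n'] (n+1) ('\n'::rest) cur acc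
            = PySem.Chars.splitOn.go ['\n'] n rest [] (cur.reverse :: acc) := by
          simp [PySem.Chars.splitOn.go, List.isPrefixOf]
        rw [h1, ih rest [] ((cur.reverse) :: acc) (by omega) (by simp)]
        rw [mySplit_append_nl cur.reverse rest (by simpa using hc)]
        simp
      · have h1 : PySem.Chars.splitOn.go ['\n'] (n+1) (c::rest) cur acc
            = PySem.Chars.splitOn.go ['\n'] n rest (c :: cur) acc := by
          simp [PySem.Chars.splitOn.go, List.isPrefixOf]
          exact fun h => absurd (Eq.symm h) hcnl
        rw [h1, ih rest (c :: cur) acc (by omega)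
          (by simp [hc]; exact fun h => hcnl (Eq.symm h))]
        simp

theorem splitOn_eq_mySplit (s : List Char) : PySem.Chars.splitOn s ['\n'] = mySplit s := by
  unfold PySem.Chars.splitOn
  rw [splitOn_go_eq (s.length + 1) s [] [] (by omega) (by simp)]
  simp

theorem prefix_append_nl (w x z : List Char) (hw : '\n' ∉ w) :
    w <+: x ++ '\n' :: z ↔ w <+: x := by
  induction x generalizing w with
  | nil =>
    simp only [List.nil_append]
    constructor
    · intro h
      cases w with
      | nil => exact List.nil_prefix
      | cons a w' =>
        rw [List.cons_prefix_cons] at h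
        exact absurd (h.1 ▸ List.mem_cons_self) hw
    · intro h
      rw [List.prefix_nil] at h
      simp [h]
  | cons b x' ih =>
    cases w with
    | nil => simp
    | cons a w' =>
      simp only [List.cons_append, List.cons_prefix_cons]
      constructor
      · rintro ⟨h1, h2⟩
        exact ⟨h1, (ih w' (fun hm => hw (List.mem_cons_of_mem _ hm))).1 h2⟩
      · rintro ⟨h1, h2⟩
        exact ⟨h1, (ih w' (fun hm => hw (List.mem_cons_of_mem _ hm))).2 h2⟩

theorem lineeq_prefix (w x z : List Char) (hw : '\n' ∉ w) (hx : '\n' ∉ x) :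
    w ++ ['\n'] <+: x ++ '\n' :: z ↔ x = w := by
  induction x generalizing w with
  | nil =>
    cases w with
    | nil => simp
    | cons a w' =>
      simp only [List.nil_append, List.cons_append, List.cons_prefix_cons]
      constructor
      · rintro ⟨h1, _⟩
        exact absurd (h1 ▸ List.mem_cons_self) hw
      · intro h; cases h
  | cons b x' ih =>
    simp only [List.mem_cons, not_or] at hx
    cases w with
    | nil =>
      simp only [List.nil_append, List.cons_append, List.cons_prefix_cons]
      constructor
      · rintro ⟨h1, _⟩
        exact absurd h1 (fun h => hx.1 h)
      · intro h; cases h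
    | cons a w' =>
      simp only [List.cons_append, List.cons_prefix_cons]
      constructor
      · rintro ⟨h1, h2⟩
        rw [(ih w' (fun hm => hw (List.mem_cons_of_mem _ hm)) hx.2).1 h2, h1]
      · intro h
        injection h with h1 h2
        exact ⟨h1.symm, (ih w' (fun hm => hw (List.mem_cons_of_mem _ hm)) hx.2).2 h2⟩

theorem infix_shift (w l0 r : List Char) (hl0 : '\n' ∉ l0) :
    '\n' :: w <:+: l0 ++ '\n' :: r ↔ '\n' :: w <:+: '\n' :: r := by
  induction l0 with
  | nil => simp
  | cons b l0' ih =>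
    simp only [List.mem_cons, not_or] at hl0
    rw [List.cons_append, List.infix_cons_iff]
    constructor
    · rintro (h | h)
      · rw [List.cons_prefix_cons] at h
        exact absurd h.1 (fun h => hl0.1 h)
      · exact (ih hl0.2).1 h
    · intro h
      exact Or.inr ((ih hl0.2).2 h)

theorem find_eq_of_first (s sub : List Char) (k : Nat)
    (h1 : sub <+: s.drop k) (h2 : ∀ i < k, ¬ sub <+: s.drop i) :
    PySem.Chars.find s sub = k := by
  have hin : sub <:+: s := h1.isInfix.trans (List.drop_suffix k s).isInfix
  have hne : PySem.Chars.find s sub ≠ -1 := (PySem.Chars.find_ne_neg_one_iff s sub).2 hin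
  have hge : 0 ≤ PySem.Chars.find s sub := by
    have := PySem.Chars.neg_one_le_find s sub
    omega
  obtain ⟨hp, hmin⟩ := PySem.Chars.find_spec hge
  by_cases hlt : (PySem.Chars.find s sub).toNat < k
  · exact absurd hp (h2 _ hlt)
  · by_cases hgt : k < (PySem.Chars.find s sub).toNat
    · exact absurd h1 (hmin k hgt)
    · omega

theorem find_none_of (s sub : List Char) (h : ¬ sub <:+: s) : PySem.Chars.find s sub = -1 :=
  (PySem.Chars.find_eq_neg_one_iff s sub).2 h

theorem find_shift (w l0 r : List Char) (hl0 : '\n' ∉ l0) :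
    PySem.Chars.find (l0 ++ '\n' :: r) ('\n' :: w) =
      (if PySem.Chars.find ('\n' :: r) ('\n' :: w) = -1 then -1
       else l0.length + PySem.Chars.find ('\n' :: r) ('\n' :: w)) := by
  by_cases hn : PySem.Chars.find ('\n' :: r) ('\n' :: w) = -1
  · rw [if_pos hn]
    apply find_none_of
    intro hin
    exact ((PySem.Chars.find_eq_neg_one_iff _ _).1 hn)
      ((infix_shift w l0 r hl0).1 hin)
  · rw [if_neg hn]
    have hge : 0 ≤ PySem.Chars.find ('\n' :: r) ('\n' :: w) := by
      have := PySem.Chars.neg_one_le_find ('\n' :: r) ('\n' :: w)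
      omega
    obtain ⟨hp, hmin⟩ := PySem.Chars.find_spec hge
    set f := (PySem.Chars.find ('\n' :: r) ('\n' :: w)).toNat with hf
    have hkey : PySem.Chars.find (l0 ++ '\n' :: r) ('\n' :: w) = (l0.length + f : Nat) := by
      apply find_eq_of_first
      · rw [List.drop_length_add_append]
        exact hp
      · intro i hi hpre
        by_cases hil : i < l0.length
        · have hdrop : (l0 ++ '\n' :: r).drop i = l0.drop i ++ '\n' :: r := by
            rw [List.drop_append_of_le_length (by omega)]
          rw [hdrop] at hpre
          have : l0.drop i ≠ [] := by
            intro hnil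
            simp [List.drop_eq_nil_iff] at hnil
            omega
          obtain ⟨c, cs, hcc⟩ := List.exists_cons_of_ne_nil this
          rw [hcc, List.cons_append, List.cons_prefix_cons] at hpre
          have : c ∈ l0 := by
            have : c ∈ l0.drop i := hcc ▸ List.mem_cons_self
            exact List.mem_of_mem_drop this
          exact hl0 (hpre.1 ▸ this)
        · have : (l0 ++ '\n' :: r).drop i = ('\n' :: r).drop (i - l0.length) := by
            conv_lhs => rw [show i = l0.length + (i - l0.length) by omega, List.drop_length_add_append]
          rw [this] at hpre
          exact hmin (i - l0.length) (by omega) hpre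
    rw [hkey]
    push_cast
    omega

theorem find_nl_of_nlfree (u : List Char) (hu : '\n' ∉ u) :
    PySem.Chars.find u ['\n'] = -1 := by
  apply find_none_of
  intro h
  exact hu (h.sublist.mem List.mem_cons_self)

theorem find_nl_append (u z : List Char) (hu : '\n' ∉ u) :
    PySem.Chars.find (u ++ '\n' :: z) ['\n'] = u.length := by
  apply find_eq_of_first
  · rw [List.drop_left]
    simp
  · intro i hi hpre
    have hdrop : (u ++ '\n' :: z).drop i = u.drop i ++ '\n' :: z := by
      rw [List.drop_append_of_le_length (by omega)]
    rw [hdrop] at hpre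
    have hne : u.drop i ≠ [] := by
      intro hnil
      simp [List.drop_eq_nil_iff] at hnil
      omega
    obtain ⟨c, cs, hcc⟩ := List.exists_cons_of_ne_nil hne
    rw [hcc, List.cons_append, List.cons_prefix_cons] at hpre
    have : c ∈ u := List.mem_of_mem_drop (hcc ▸ List.mem_cons_self)
    exact hu (hpre.1 ▸ this)

def nlL (s : List (List Char)) : List Char := s.flatMap (fun l => '\n' :: l)
def nlK (s : List (List Char)) : List Char := s.flatMap (fun l => l ++ ['\n'])
def nlOff (t : List (List Char)) (i : Nat) : Nat := ((t.take i).map List.length).sum + i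

theorem join_cons (x : List Char) (r : List (List Char)) :
    nlJ (x :: r) = x ++ (if r = [] then [] else '\n' :: nlJ r) := by
  cases r with
  | nil => simp [nlJ, PySem.Chars.join_singleton]
  | cons y r' =>
    rw [nlJ, PySem.Chars.join_cons_cons]
    simp [nlJ]

theorem find_step (t : List (List Char)) (w : List Char)
    (ht : ∀ l ∈ t, '\n' ∉ l) (hw : '\n' ∉ w) (hne : w ≠ []) :
    PySem.Chars.find ('\n' :: nlJ t) ('\n' :: w) =
      (match t.findIdx? (fun l => PySem.Chars.startswith l w) with
       | none => -1
       | some i => (nlOff t i : Int)) := by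
  induction t with
  | nil =>
    simp only [List.findIdx?_nil]
    apply find_none_of
    intro h
    have := h.length_le
    exact hne (by simpa [nlJ, PySem.Chars.join_nil] using this)
  | cons x t' ih =>
    have hx : '\n' ∉ x := ht x List.mem_cons_self
    have ht' : ∀ l ∈ t', '\n' ∉ l := fun l hl => ht l (List.mem_cons_of_mem _ hl)
    rw [List.findIdx?_cons]
    by_cases hsw : PySem.Chars.startswith x w = true
    · rw [if_pos hsw]
      have hpre : w <+: x := (PySem.Chars.startswith_iff x w).1 hsw
      have : PySem.Chars.find ('\n' :: nlJ (x :: t')) ('\n' :: w) = (0 : Nat) := by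
        apply find_eq_of_first
        · simp only [List.drop_zero, join_cons]
          rw [List.cons_prefix_cons]
          refine ⟨rfl, ?_⟩
          exact hpre.trans (List.prefix_append x _)
        · intro i hi; omega
      simpa using this
    · rw [if_neg hsw]
      have hnpre : ¬ w <+: x := fun h => hsw ((PySem.Chars.startswith_iff x w).2 h)
      cases ht'' : t' with
      | nil =>
        subst ht''
        simp only [List.findIdx?_nil, Option.map_none]
        apply find_none_of
        rw [join_cons, if_pos rfl, List.append_nil]
        intro h
        rw [List.infix_cons_iff] at h
        rcases h with h | h
        · rw [List.cons_prefix_cons] at h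
          exact hnpre h.2
        · exact hx (h.sublist.mem List.mem_cons_self)
      | cons y r' =>
        rw [← ht'']
        have ht'ne : t' ≠ [] := by rw [ht'']; simp
        have hjoin : nlJ (x :: t') = x ++ '\n' :: nlJ t' := by
          rw [join_cons, if_neg ht'ne]
        rw [hjoin]
        have hcons : PySem.Chars.find ('\n' :: (x ++ '\n' :: nlJ t')) ('\n' :: w) =
            (if PySem.Chars.find (x ++ '\n' :: nlJ t') ('\n' :: w) = -1 then -1
             else PySem.Chars.find (x ++ '\n' :: nlJ t') ('\n' :: w) + 1) := by
          -- occurrence at 0 is impossible: w would be a prefix of x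
          by_cases hin : PySem.Chars.find (x ++ '\n' :: nlJ t') ('\n' :: w) = -1
          · rw [if_pos hin]
            apply find_none_of
            intro h
            rw [List.infix_cons_iff] at h
            rcases h with h | h
            · rw [List.cons_prefix_cons] at h
              exact hnpre ((prefix_append_nl w x (nlJ t') hw).1 h.2)
            · exact ((PySem.Chars.find_eq_neg_one_iff _ _).1 hin) h
          · rw [if_neg hin]
            have hge : 0 ≤ PySem.Chars.find (x ++ '\n' :: nlJ t') ('\n' :: w) := by
              have := PySem.Chars.neg_one_le_find (x ++ '\n' :: nlJ t') ('\n' :: w)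
              omega
            obtain ⟨hp, hmin⟩ := PySem.Chars.find_spec hge
            set f := (PySem.Chars.find (x ++ '\n' :: nlJ t') ('\n' :: w)).toNat with hfdef
            have : PySem.Chars.find ('\n' :: (x ++ '\n' :: nlJ t')) ('\n' :: w) = (f + 1 : Nat) := by
              apply find_eq_of_first
              · simpa using hp
              · intro i hi hpre2
                cases i with
                | zero =>
                  simp only [List.drop_zero, List.cons_prefix_cons] at hpre2
                  exact hnpre ((prefix_append_nl w x (nlJ t') hw).1 hpre2.2)
                | succ j =>
                  have : (('\n' :: (x ++ '\n' :: nlJ t'))).drop (j+1) = (x ++ '\n' :: nlJ t').drop j := by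
                    simp
                  rw [this] at hpre2
                  exact hmin j (by omega) hpre2
            rw [this]
            omega
        rw [hcons, find_shift w x (nlJ t') hx, ih ht']
        cases hidx : t'.findIdx? (fun l => PySem.Chars.startswith l w) with
        | none => simp
        | some i =>
          have h1 : ¬ ((nlOff t' i : Int) = -1) := by omega
          rw [if_neg h1]
          simp only [Option.map_some]
          show (x.length : Int) + (nlOff t' i : Int) + 1 = ((nlOff (x :: t') (i+1) : Nat) : Int)
          unfold nlOff
          simp [List.take_succ_cons]
          ring

theorem drop_off (t : List (List Char)) (l0 : List Char) (i : Nat) (hi : i < t.length) :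
    (l0 ++ '\n' :: nlJ t).drop (l0.length + nlOff t i) = '\n' :: nlJ (t.drop i) := by
  induction i generalizing t l0 with
  | zero =>
    simp [nlOff]
  | succ j ihj =>
    cases t with
    | nil => simp at hi
    | cons x t' =>
      have ht'ne : t' ≠ [] := by
        intro h; subst h; simp at hi
      have hjoin : nlJ (x :: t') = x ++ '\n' :: nlJ t' := by
        rw [join_cons, if_neg ht'ne]
      have hoff : nlOff (x :: t') (j+1) = x.length + 1 + nlOff t' j := by
        unfold nlOff
        simp [List.take_succ_cons]
        omega
      have hre : l0 ++ '\n' :: nlJ (x :: t') = (l0 ++ '\n' :: x) ++ '\n' :: nlJ t' := by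
        rw [hjoin]; simp
      have hlen : l0.length + nlOff (x :: t') (j+1) = (l0 ++ '\n' :: x).length + nlOff t' j := by
        simp [hoff]; omega
      rw [hre, hlen, ihj t' (l0 ++ '\n' :: x) (by simpa using Nat.lt_of_succ_lt_succ (by simpa using hi))]
      simp

theorem take_off (t : List (List Char)) (l0 : List Char) (i : Nat) (hi : i < t.length) :
    (l0 ++ '\n' :: nlJ t).take (l0.length + nlOff t i) = l0 ++ nlL (t.take i) := by
  induction i generalizing t l0 with
  | zero =>
    simp [nlOff, nlL]
  | succ j ihj =>
    cases t with
    | nil => simp at hi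
    | cons x t' =>
      have ht'ne : t' ≠ [] := by
        intro h; subst h; simp at hi
      have hjoin : nlJ (x :: t') = x ++ '\n' :: nlJ t' := by
        rw [join_cons, if_neg ht'ne]
      have hoff : nlOff (x :: t') (j+1) = x.length + 1 + nlOff t' j := by
        unfold nlOff
        simp [List.take_succ_cons]
        omega
      have hre : l0 ++ '\n' :: nlJ (x :: t') = (l0 ++ '\n' :: x) ++ '\n' :: nlJ t' := by
        rw [hjoin]; simp
      have hlen : l0.length + nlOff (x :: t') (j+1) = (l0 ++ '\n' :: x).length + nlOff t' j := by
        simp [hoff]; omega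
      rw [hre, hlen, ihj t' (l0 ++ '\n' :: x) (by simpa using Nat.lt_of_succ_lt_succ (by simpa using hi))]
      simp [nlL, List.take_succ_cons]

theorem join_split (s r : List (List Char)) (hr : r ≠ []) :
    '\n' :: nlJ (s ++ r) = nlL s ++ '\n' :: nlJ r := by
  induction s with
  | nil => simp [nlL]
  | cons x s' ih =>
    have hne : s' ++ r ≠ [] := by simp [hr]
    rw [List.cons_append, join_cons, if_neg hne, ih]
    simp [nlL]

theorem nlL_append_nl (s : List (List Char)) : nlL s ++ ['\n'] = '\n' :: nlK s := by
  induction s with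
  | nil => simp [nlL, nlK]
  | cons x s' ih =>
    simp only [nlL, nlK, List.flatMap_cons] at *
    simp [← ih]

theorem dash_infix_K (s : List (List Char)) (hs : ∀ l ∈ s, '\n' ∉ l) :
    (['\n', '-', '-', '-', '\n'] <:+: '\n' :: nlK s) ↔ ['-', '-', '-'] ∈ s := by
  induction s with
  | nil =>
    simp only [nlK, List.flatMap_nil]
    constructor
    · intro h
      have := h.length_le
      simp at this
    · simp
  | cons x s' ih =>
    have hx : '\n' ∉ x := hs x List.mem_cons_self
    have hs' : ∀ l ∈ s', '\n' ∉ l := fun l hl => hs l (List.mem_cons_of_mem _ hl)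
    have hK : nlK (x :: s') = x ++ '\n' :: nlK s' := by
      simp [nlK]
    rw [hK, List.infix_cons_iff]
    constructor
    · rintro (h | h)
      · rw [List.cons_prefix_cons] at h
        have : x = ['-','-','-'] :=
          (lineeq_prefix ['-','-','-'] x (nlK s') (by simp) hx).1 (by simpa using h.2)
        simp [this]
      · rw [infix_shift _ x (nlK s') hx] at h
        exact List.mem_cons_of_mem _ ((ih hs').1 h)
    · intro h
      rcases List.mem_cons.1 h with h1 | h1
      · left
        rw [List.cons_prefix_cons]
        refine ⟨rfl, ?_⟩
        have := (lineeq_prefix ['-','-','-'] x (nlK s') (by simp) hx).2 h1.symm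
        simpa using this
      · right
        rw [infix_shift _ x (nlK s') hx]
        exact (ih hs').2 h1

theorem loopA_of_no_tags (nl : List Char) (t : List (List Char))
    (h : t.findIdx? (fun l => PySem.Chars.startswith l ['t', 'a', 'g', 's', ':']) = none) :
    setTagsLoopA nl t = t := by
  induction t with
  | nil => rfl
  | cons l rest ih =>
    rw [List.findIdx?_cons] at h
    by_cases htag : PySem.Chars.startswith l ['t', 'a', 'g', 's', ':'] = true
    · simp [htag] at h
    · rw [if_neg htag] at h
      simp only [Option.map_eq_none_iff] at h
      simp only [setTagsLoopA, htag]
      split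
      · rfl
      · rw [ih (by simpa using h)]
        rfl

theorem loopA_of_dash_before (nl : List Char) (t : List (List Char)) (i : Nat)
    (h : t.findIdx? (fun l => PySem.Chars.startswith l ['t', 'a', 'g', 's', ':']) = some i)
    (hd : ['-', '-', '-'] ∈ t.take i) :
    setTagsLoopA nl t = t := by
  induction t generalizing i with
  | nil => rfl
  | cons l rest ih =>
    rw [List.findIdx?_cons] at h
    by_cases htag : PySem.Chars.startswith l ['t', 'a', 'g', 's', ':'] = true
    · rw [if_pos htag] at h
      injection h with h
      subst h
      simp at hd
    · rw [if_neg htag] at h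
      simp only [Option.map_eq_some_iff] at h
      obtain ⟨j, hj, hji⟩ := h
      subst hji
      simp only [List.take_succ_cons, List.mem_cons] at hd
      simp only [setTagsLoopA, htag]
      rcases hd with hd | hd
      · rw [if_pos hd.symm]
      · split
        · rfl
        · rw [ih j hj hd]
          rfl

theorem loopA_of_tags_first (nl : List Char) (t : List (List Char)) (i : Nat)
    (h : t.findIdx? (fun l => PySem.Chars.startswith l ['t', 'a', 'g', 's', ':']) = some i)
    (hd : ['-', '-', '-'] ∉ t.take i) :
    setTagsLoopA nl t = t.take i ++ nl :: t.drop (i + 1) := by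
  induction t generalizing i with
  | nil => simp at h
  | cons l rest ih =>
    rw [List.findIdx?_cons] at h
    by_cases htag : PySem.Chars.startswith l ['t', 'a', 'g', 's', ':'] = true
    · rw [if_pos htag] at h
      injection h with h
      subst h
      have hld : l ≠ ['-', '-', '-'] := by
        intro hl
        exact absurd (by decide : PySem.Chars.startswith ['-','-','-'] ['t','a','g','s',':'] = false)
          (by rw [← hl]; simp [htag])
      simp [setTagsLoopA, hld, htag]
    · rw [if_neg htag] at h
      simp only [Option.map_eq_some_iff] at h
      obtain ⟨j, hj, hji⟩ := h
      subst hji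
      simp only [List.take_succ_cons, List.mem_cons, not_or] at hd
      have hld : ¬ l = ['-', '-', '-'] := fun hh => hd.1 (Eq.symm hh)
      simp only [setTagsLoopA, htag, if_neg hld]
      rw [ih j hj hd.2]
      simp [List.take_succ_cons]
theorem findIdx?_getElem {α} (t : List α) (p : α → Bool) (i : Nat) (h : t.findIdx? p = some i)
    (hi : i < t.length) : p t[i] = true := by
  induction t generalizing i with
  | nil => simp at h
  | cons x r ih =>
    rw [List.findIdx?_cons] at h
    by_cases hp : p x = true
    · rw [if_pos hp] at h
      injection h with h
      subst h
      simpa using hp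
    · rw [if_neg hp] at h
      simp only [Option.map_eq_some_iff] at h
      obtain ⟨j, hj, hji⟩ := h
      subst hji
      simpa using ih j hj (by simpa using hi)

-- ===== VERDICT (by name: the statement is the Claim_ definition above) =====
theorem set_tags_py_spec : Claim_equal_set_tags_py := by
  intro text tags _
  unfold Spec_set_tags_py set_tags_py set_tags_py_alt
  by_cases hsw : PySem.Str.startswith text "---\n" = true
  · simp only [hsw, Bool.not_true, Bool.false_eq_true, if_false]
    -- decompose the text
    have hpre0 : ("---\n").toList = ['-','-','-','\n'] := by decide
    obtain ⟨body, hbody⟩ : ∃ body, text.toList = ['-','-','-','\n'] ++ body := by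
      rw [PySem.Str.startswith_eq, PySem.Chars.startswith_iff, hpre0] at hsw
      obtain ⟨r, hr⟩ := hsw
      exact ⟨r, hr.symm⟩
    set t := mySplit body with ht
    have htne : t ≠ [] := mySplit_ne_nil body
    have htfree : ∀ l ∈ t, '\n' ∉ l := nlfree_mySplit body
    have hJ : nlJ t = body := join_mySplit body
    have hcs : text.toList = ['-','-','-'] ++ '\n' :: nlJ t := by
      rw [hbody, hJ]; rfl
    have hsplit : PySem.Chars.splitOn text.toList ['\n'] = ['-','-','-'] :: t := by
      rw [splitOn_eq_mySplit, hbody]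
      have : (['-','-','-','\n'] : List Char) ++ body = ['-','-','-'] ++ '\n' :: body := rfl
      rw [this, mySplit_append_nl _ _ (by decide)]
    rw [hsplit]
    set nl := PySem.Chars.rstrip (('t' :: 'a' :: 'g' :: 's' :: ':' :: ' ' :: []) ++
        PySem.Chars.join [',', ' '] (tags.map String.toList)) with hnl
    have hfind : PySem.Chars.find text.toList ('\n' :: 't' :: 'a' :: 'g' :: 's' :: ':' :: []) =
        (if PySem.Chars.find ('\n' :: nlJ t) ('\n' :: ['t','a','g','s',':']) = -1 then -1
         else (3 : Int) + PySem.Chars.find ('\n' :: nlJ t) ('\n' :: ['t','a','g','s',':'])) := by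
      rw [hcs]
      exact find_shift ['t','a','g','s',':'] ['-','-','-'] (nlJ t) (by decide)
    rw [find_step t ['t','a','g','s',':'] htfree (by decide) (by decide)] at hfind
    cases hidx : t.findIdx? (fun l => PySem.Chars.startswith l ['t','a','g','s',':']) with
    | none =>
      -- no tags line anywhere: both sides return the text
      rw [hidx] at hfind
      have hfind2 : PySem.Chars.find text.toList ('\n' :: 't' :: 'a' :: 'g' :: 's' :: ':' :: []) = -1 := by
        rw [hfind]; norm_num
      rw [hfind2, if_pos rfl]
      have hmatch : (match (['-','-','-'] :: t : List (List Char)) with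
        | [] => ([] : List (List Char))
        | h :: t2 => h :: setTagsLoopA nl t2) = ['-','-','-'] :: setTagsLoopA nl t := rfl
      rw [hmatch, loopA_of_no_tags nl t hidx]
      show String.ofList (nlJ (['-','-','-'] :: t)) = text
      rw [join_cons, if_neg htne, ← hcs, String.ofList_toList]
    | some i =>
      rw [hidx] at hfind
      have hi : i < t.length := (List.findIdx?_eq_some_iff_findIdx_eq.1 hidx).1
      have hfind2 : PySem.Chars.find text.toList ('\n' :: 't' :: 'a' :: 'g' :: 's' :: ':' :: []) =
          ((3 + nlOff t i : Nat) : Int) := by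
        rw [hfind]
        have h0 : ¬ ((nlOff t i : Int) = -1) := by
          have := Int.natCast_nonneg (nlOff t i); omega
        rw [if_neg h0]
        push_cast
        ring
      rw [hfind2, if_neg (by
        have := Int.natCast_nonneg (3 + nlOff t i); omega)]
      rw [Int.toNat_natCast]
      have hpre : text.toList.take (3 + nlOff t i) = ['-','-','-'] ++ nlL (t.take i) := by
        rw [hcs]
        exact take_off t ['-','-','-'] i hi
      rw [hpre]
      -- the closing-'---' test
      have hdash : PySem.Chars.isIn ['\n','-','-','-','\n']
          ((['-','-','-'] ++ nlL (t.take i)) ++ ['\n']) = true ↔ ['-','-','-'] ∈ t.take i := by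
        rw [PySem.Chars.isIn_iff_infix, List.append_assoc, nlL_append_nl]
        rw [infix_shift _ ['-','-','-'] _ (by decide)]
        exact dash_infix_K (t.take i) (fun l hl => htfree l (List.mem_of_mem_take hl))
      by_cases hd : ['-','-','-'] ∈ t.take i
      · rw [if_pos (hdash.2 hd)]
        have hmatch : (match (['-','-','-'] :: t : List (List Char)) with
          | [] => ([] : List (List Char))
          | h :: t2 => h :: setTagsLoopA nl t2) = ['-','-','-'] :: setTagsLoopA nl t := rfl
        rw [hmatch, loopA_of_dash_before nl t i hidx hd]
        show String.ofList (nlJ (['-','-','-'] :: t)) = text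
        rw [join_cons, if_neg htne, ← hcs, String.ofList_toList]
      · rw [if_neg (fun hh => hd (hdash.1 hh))]
        -- the replacement case
        have htags : PySem.Chars.startswith t[i] ['t','a','g','s',':'] = true :=
          findIdx?_getElem t _ i hidx hi
        obtain ⟨u, hu⟩ : ∃ u, t[i] = ['t','a','g','s',':'] ++ u := by
          obtain ⟨r, hr⟩ := (PySem.Chars.startswith_iff _ _).1 htags
          exact ⟨r, hr.symm⟩
        have hufree : '\n' ∉ u := by
          intro hmem
          exact htfree t[i] (List.getElem_mem hi) (by rw [hu]; simp [hmem])
        have hdropcs : text.toList.drop (3 + nlOff t i) = '\n' :: nlJ (t.drop i) := by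
          rw [hcs]
          exact drop_off t ['-','-','-'] i hi
        have hdropi : t.drop i = t[i] :: t.drop (i+1) := (List.getElem_cons_drop hi).symm
        set tailA : List Char :=
          (if t.drop (i+1) = [] then [] else '\n' :: nlJ (t.drop (i+1))) with htailA
        have hpost : text.toList.drop (3 + nlOff t i + 6) = u ++ tailA := by
          rw [show 3 + nlOff t i + 6 = (3 + nlOff t i) + 6 by ring, ← List.drop_drop, hdropcs]
          rw [hdropi, join_cons, ← htailA, hu]
          show (['t','a','g','s',':'] ++ u ++ tailA).drop 5 = u ++ tailA
          rw [List.append_assoc]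
          exact List.drop_left (l₁ := ['t','a','g','s',':']) (l₂ := u ++ tailA)
        rw [hpost]
        -- A's side
        have hmatch : (match (['-','-','-'] :: t : List (List Char)) with
          | [] => ([] : List (List Char))
          | h :: t2 => h :: setTagsLoopA nl t2) = ['-','-','-'] :: setTagsLoopA nl t := rfl
        rw [hmatch, loopA_of_tags_first nl t i hidx hd]
        have hAlist : PySem.Chars.join ['\n'] (['-','-','-'] :: (t.take i ++ nl :: t.drop (i+1))) =
            (['-','-','-'] ++ nlL (t.take i)) ++ '\n' :: (nl ++ tailA) := by
          show nlJ (['-','-','-'] :: (t.take i ++ nl :: t.drop (i+1))) = _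
          rw [join_cons, if_neg (by simp)]
          have h1 : '\n' :: nlJ (t.take i ++ nl :: t.drop (i+1)) =
              nlL (t.take i) ++ '\n' :: nlJ (nl :: t.drop (i+1)) :=
            join_split (t.take i) (nl :: t.drop (i+1)) (by simp)
          rw [h1, join_cons]
          simp [htailA]
        rw [hAlist]
        -- B's side: the find on the post part
        cases hrest : t.drop (i+1) with
        | nil =>
          have : tailA = [] := by rw [htailA, if_pos hrest]
          rw [this]
          simp only [List.append_nil]
          rw [find_nl_of_nlfree u hufree, if_pos rfl]
          simp
        | cons y r' =>
          have htA : tailA = '\n' :: nlJ (t.drop (i+1)) := by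
            rw [htailA, if_neg (by rw [hrest]; simp)]
          rw [htA, find_nl_append u _ hufree]
          rw [if_neg (by omega : ¬ ((u.length : Int) = -1))]
          have : ((u.length : Int)).toNat = u.length := by omega
          rw [this]
          have hdrop2 : (u ++ '\n' :: nlJ (t.drop (i+1))).drop (u.length + 1) = nlJ (t.drop (i+1)) := by
            rw [show u.length + 1 = u.length + 1 by rfl]
            rw [List.drop_length_add_append 1]
            simp
          rw [hdrop2]
  · have h' : PySem.Str.startswith text "---\n" = false := by
      simpa using hsw
    simp only [PySem.Str.startswith_eq] at h'
    rw [(by decide : ("---\n").toList = ['-','-','-','\n'])] at h'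
    simp [h']
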